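-- pv_equiv track=rewrite | github.com/sudharsan-w/netflow-analyser-api | process_netflow_multi.py | parse_netflow_data
-- ===== SOURCE A (Python) =====
-- def parse_netflow_data(flow_data):
--     """Process a flow of data (38 lines) into a parsed format."""
--     flow_records = []
--     current_record = []
--     flow_size = 0  # To track the size of the flow (38 lines)
--     for line in flow_data:
--         line = line.strip()
--         if line.startswith("Flow Record"):
--             # If there is a current flow being collected, process it
--             if current_record:
--                 flow_records.append(current_record)
--                 current_record = []  # Reset for the next flow
--             current_record.append(line)
--             flow_size = 1  # Start counting the flow size (including this line)
--         else:
--             current_record.append(line)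
--             flow_size += 1
--             # When the flow size reaches 38, process the flow and reset
--             if flow_size == 38:
--                 flow_records.append(current_record)
--                 current_record = []  # Reset for the next flow
--
--     # Add the last flow record if exists
--     if current_record:
--         flow_records.append(current_record)
--
--     return flow_records
-- ===== SOURCE B (Python) =====
-- def parse_netflow_data(flow_data):
--     """Two-pass version: segment the stripped lines at 'Flow Record' markers,
--     then split each segment into its first 38 lines and (if any) the remainder."""
--     segments = []
--     cur = []
--     for line in flow_data:
--         line = line.strip()
--         if line.startswith("Flow Record"):
--             if cur:
--                 segments.append(cur)
--             cur = [line]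
--         else:
--             cur.append(line)
--     if cur:
--         segments.append(cur)
--     records = []
--     for seg in segments:
--         records.append(seg[:38])
--         if len(seg) > 38:
--             records.append(seg[38:])
--     return records
-- ===== Notes on version B (the rewrite author's own statement) =====
-- stated objective: alternative
-- what changed: B replaces A's single loop with interleaved counter/flush state by two passes: first segment the stripped lines at 'Flow Record' markers, then split each segment into its first 38 lines plus a nonempty remainder; no running flow_size counter is maintained.
import Mathlib
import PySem

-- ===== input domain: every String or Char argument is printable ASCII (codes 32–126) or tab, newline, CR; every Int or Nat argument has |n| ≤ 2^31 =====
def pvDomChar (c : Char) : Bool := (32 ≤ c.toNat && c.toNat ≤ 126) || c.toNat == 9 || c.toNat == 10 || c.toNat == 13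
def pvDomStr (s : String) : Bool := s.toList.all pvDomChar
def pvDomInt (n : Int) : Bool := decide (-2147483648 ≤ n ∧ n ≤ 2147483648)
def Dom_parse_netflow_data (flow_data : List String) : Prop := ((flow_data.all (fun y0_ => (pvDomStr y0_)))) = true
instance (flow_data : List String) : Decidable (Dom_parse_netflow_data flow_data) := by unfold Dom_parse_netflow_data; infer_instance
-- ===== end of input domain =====

-- B is an alternative two-pass decomposition (segment at markers, then split each segment at 38); same cost, no counter state.

-- ===== PORT A =====
-- one step of A's for-loop: state = (flow_records, current_record, flow_size)
def pvStepA (st : List (List String) × List String × Int) (line : String) :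
    List (List String) × List String × Int :=
  let l := PySem.Str.strip line
  if PySem.Str.startswith l "Flow Record" then
    -- flush current_record if nonempty, then current_record = [l], flow_size = 1
    let recs := if st.2.1 ≠ [] then st.1 ++ [st.2.1] else st.1
    (recs, [l], 1)
  else
    let cur := st.2.1 ++ [l]
    let sz := st.2.2 + 1
    if sz = 38 then (st.1 ++ [cur], [], sz) else (st.1, cur, sz)

def parse_netflow_data (flow_data : List String) : List (List String) :=
  let st := flow_data.foldl pvStepA ([], [], 0)
  if st.2.1 ≠ [] then st.1 ++ [st.2.1] else st.1

-- ===== PORT B =====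
-- pass 1: one step of the segmentation loop: state = (segments, cur)
def pvStepSeg (st : List (List String) × List String) (line : String) :
    List (List String) × List String :=
  let l := PySem.Str.strip line
  if PySem.Str.startswith l "Flow Record" then
    let segs := if st.2 ≠ [] then st.1 ++ [st.2] else st.1
    (segs, [l])
  else
    (st.1, st.2 ++ [l])

-- pass 2: one step of the emission loop (seg[:38] / seg[38:] = take/drop: slice bounds nonnegative)
def pvEmit (acc : List (List String)) (seg : List String) : List (List String) :=
  let acc := acc ++ [seg.take 38]
  if 38 < seg.length then acc ++ [seg.drop 38] else acc

def parse_netflow_data_alt (flow_data : List String) : List (List String) :=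
  let st := flow_data.foldl pvStepSeg ([], [])
  let segs := if st.2 ≠ [] then st.1 ++ [st.2] else st.1
  segs.foldl pvEmit []

-- ===== PRECONDITION & SPEC =====
def Spec_parse_netflow_data (flow_data : List String) (out : List (List String)) : Prop := out = parse_netflow_data_alt flow_data
instance (flow_data : List String) (out : List (List String)) : Decidable (Spec_parse_netflow_data flow_data out) := by unfold Spec_parse_netflow_data; infer_instance

-- ===== CLAIM (what is proved, stated in full; the proofs are below) =====
def Claim_equal_parse_netflow_data : Prop := ∀ (flow_data : List String), Dom_parse_netflow_data flow_data → Spec_parse_netflow_data flow_data (parse_netflow_data flow_data)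

-- ===== LEMMAS AND PROOFS =====

-- results of B's emission pass, starting from the empty accumulator
def pvE (segs : List (List String)) : List (List String) := segs.foldl pvEmit []

lemma pvEmit_eq (acc : List (List String)) (c : List String) :
    pvEmit acc c = acc ++ pvEmit [] c := by
  simp only [pvEmit]
  split <;> simp

lemma pvE_append (segs : List (List String)) (c : List String) :
    pvE (segs ++ [c]) = pvE segs ++ pvEmit [] c := by
  simp only [pvE, List.foldl_append, List.foldl_cons, List.foldl_nil]
  exact pvEmit_eq _ _

-- the A-state/B-state invariant
def pvInv (segs : List (List String)) (curB : List String)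
    (recs : List (List String)) (curA : List String) : Prop :=
  if curB.length < 38 then (curA = curB ∧ recs = pvE segs)
  else (curA = curB.drop 38 ∧ recs = pvE segs ++ [curB.take 38])

-- flushing the current block on both sides preserves equality of outputs
lemma pv_flush (segs : List (List String)) (curB : List String)
    (recs : List (List String)) (curA : List String)
    (h : pvInv segs curB recs curA) :
    (if curA ≠ [] then recs ++ [curA] else recs)
      = pvE (if curB ≠ [] then segs ++ [curB] else segs) := by
  unfold pvInv at h
  by_cases hlt : curB.length < 38
  · rw [if_pos hlt] at h
    obtain ⟨hc, hr⟩ := h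
    subst hr
    rw [hc]
    by_cases hB : curB = []
    · simp [hB]
    · rw [if_pos hB, if_pos hB, pvE_append]
      have ht : curB.take 38 = curB := List.take_of_length_le (by omega)
      simp [pvEmit, ht, Nat.not_lt.mpr (Nat.le_of_lt hlt)]
  · rw [if_neg hlt] at h
    obtain ⟨hc, hr⟩ := h
    subst hr
    rw [hc]
    have hlen : 38 ≤ curB.length := Nat.le_of_not_lt hlt
    have hB : curB ≠ [] := by intro h; subst h; simp at hlen
    rw [if_pos hB, pvE_append]
    by_cases hd : curB.drop 38 = []
    · have h38 : ¬ 38 < curB.length := by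
        have := List.drop_eq_nil_iff.mp hd; omega
      simp [hd, pvEmit, h38]
    · have h38 : 38 < curB.length := by
        by_contra hh
        exact hd (List.drop_eq_nil_of_le (by omega))
      simp [hd, pvEmit, h38]

-- one step of A, both cases, with the state written out
lemma pvStepA_marker (recs : List (List String)) (curA : List String) (sz : Int) (line : String)
    (hm : PySem.Str.startswith (PySem.Str.strip line) "Flow Record" = true) :
    pvStepA (recs, curA, sz) line
      = (if curA ≠ [] then recs ++ [curA] else recs, [PySem.Str.strip line], 1) := by
  simp only [pvStepA, if_pos hm]

lemma pvStepA_plain (recs : List (List String)) (curA : List String) (sz : Int) (line : String)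
    (hm : ¬ PySem.Str.startswith (PySem.Str.strip line) "Flow Record" = true) :
    pvStepA (recs, curA, sz) line
      = if sz + 1 = 38 then (recs ++ [curA ++ [PySem.Str.strip line]], [], sz + 1)
        else (recs, curA ++ [PySem.Str.strip line], sz + 1) := by
  simp only [pvStepA, if_neg hm]

-- one step of B's segmentation pass, both cases
lemma pvStepSeg_marker (segs : List (List String)) (cur : List String) (line : String)
    (hm : PySem.Str.startswith (PySem.Str.strip line) "Flow Record" = true) :
    pvStepSeg (segs, cur) line
      = (if cur ≠ [] then segs ++ [cur] else segs, [PySem.Str.strip line]) := by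
  simp only [pvStepSeg, if_pos hm]

lemma pvStepSeg_plain (segs : List (List String)) (cur : List String) (line : String)
    (hm : ¬ PySem.Str.startswith (PySem.Str.strip line) "Flow Record" = true) :
    pvStepSeg (segs, cur) line = (segs, cur ++ [PySem.Str.strip line]) := by
  simp only [pvStepSeg, if_neg hm]

-- the loop invariant carries through the whole traversal
lemma pv_main (lines : List String) :
    ∀ (segs : List (List String)) (curB : List String)
      (recs : List (List String)) (curA : List String),
    pvInv segs curB recs curA →
    (let st := lines.foldl pvStepA (recs, curA, (curB.length : Int))
     if st.2.1 ≠ [] then st.1 ++ [st.2.1] else st.1)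
    = pvE (let st := lines.foldl pvStepSeg (segs, curB)
           if st.2 ≠ [] then st.1 ++ [st.2] else st.1) := by
  induction lines with
  | nil =>
    intro segs curB recs curA h
    show (if curA ≠ [] then recs ++ [curA] else recs)
      = pvE (if curB ≠ [] then segs ++ [curB] else segs)
    exact pv_flush segs curB recs curA h
  | cons l rest ih =>
    intro segs curB recs curA h
    show (let st := (l :: rest).foldl pvStepA (recs, curA, (curB.length : Int))
          if st.2.1 ≠ [] then st.1 ++ [st.2.1] else st.1)
      = pvE (let st := (l :: rest).foldl pvStepSeg (segs, curB)
             if st.2 ≠ [] then st.1 ++ [st.2] else st.1)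
    rw [List.foldl_cons, List.foldl_cons]
    by_cases hm : PySem.Str.startswith (PySem.Str.strip l) "Flow Record" = true
    · -- marker line: both sides flush and start a fresh block [strip l]
      rw [pvStepA_marker _ _ _ _ hm, pvStepSeg_marker _ _ _ hm]
      rw [show ((1 : Int)) = (([PySem.Str.strip l] : List String).length : Int) by simp]
      apply ih
      unfold pvInv
      rw [if_pos (by simp)]
      exact ⟨rfl, pv_flush segs curB recs curA h⟩
    · -- ordinary line: appended to the current block on both sides
      rw [pvStepA_plain _ _ _ _ hm, pvStepSeg_plain _ _ _ hm]
      unfold pvInv at h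
      by_cases hlt : curB.length < 38
      · rw [if_pos hlt] at h
        obtain ⟨hc, hr⟩ := h
        subst hr
        rw [hc]
        by_cases h37 : curB.length = 37
        · -- the block reaches 38 lines: A flushes now
          rw [if_pos (show ((curB.length : Int) + 1 = 38) by omega)]
          rw [show ((curB.length : Int) + 1) = ((curB ++ [PySem.Str.strip l]).length : Int) by simp]
          apply ih
          unfold pvInv
          have hlen' : (curB ++ [PySem.Str.strip l]).length = 38 := by simp [h37]
          rw [if_neg (by omega)]
          constructor
          · rw [List.drop_eq_nil_of_le (by rw [hlen'])]
          · rw [List.take_of_length_le (by rw [hlen'])]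
        · -- still short: no flush
          rw [if_neg (show ¬ ((curB.length : Int) + 1 = 38) by omega)]
          rw [show ((curB.length : Int) + 1) = ((curB ++ [PySem.Str.strip l]).length : Int) by simp]
          apply ih
          unfold pvInv
          rw [if_pos (by simp; omega)]
          exact ⟨rfl, rfl⟩
      · -- the block was already split: counter is ≥ 38, never equals 38 again
        rw [if_neg hlt] at h
        obtain ⟨hc, hr⟩ := h
        subst hr
        rw [hc]
        have hlen : 38 ≤ curB.length := Nat.le_of_not_lt hlt
        rw [if_neg (show ¬ ((curB.length : Int) + 1 = 38) by omega)]
        rw [show ((curB.length : Int) + 1) = ((curB ++ [PySem.Str.strip l]).length : Int) by simp]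
        apply ih
        unfold pvInv
        rw [if_neg (by simp; omega)]
        constructor
        · rw [List.drop_append_of_le_length hlen]
        · rw [List.take_append_of_le_length hlen]

-- ===== VERDICT (by name: the statement is the Claim_ definition above) =====
theorem parse_netflow_data_spec : Claim_equal_parse_netflow_data := by
  intro flow_data _
  unfold Spec_parse_netflow_data parse_netflow_data parse_netflow_data_alt
  have h := pv_main flow_data [] [] [] [] (by unfold pvInv; simp [pvE])
  simpa [pvE] using h
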